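-- pv_equiv track=rewrite | github.com/s7-esKim/BJstudy | 소정현/3월 1주차/ex_1244.py | woman_switch
-- ===== SOURCE A (Python) =====
-- def change_switch(x):
--     if x == 0:
--         x = 1
--     elif x == 1:
--         x = 0
--     return x
--
-- def woman_switch(number, switch):
--     i = 0
--     number = number-1
--     while True:
--         if i == 0:
--             switch[number] = change_switch(switch[number])
--         else:
--             if switch[(number-i)] == switch[(number+i)]:
--                 switch[number-i] = change_switch(switch[number-i])
--                 switch[number+i] = change_switch(switch[number+i])
--             else:
--                 break
--         i += 1
--
--         if (number-i) < 0 or (number+i) >= len(switch):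
--             break
--
--     return switch
-- ===== SOURCE B (Python) =====
-- def change_switch(x):
--     if x == 0:
--         x = 1
--     elif x == 1:
--         x = 0
--     return x
--
-- def woman_switch(number, switch):
--     c = number - 1
--     # pass 1: pure scan for the palindromic radius, no mutation
--     r = 0
--     while c - (r + 1) >= 0 and c + (r + 1) < len(switch) and switch[c - (r + 1)] == switch[c + (r + 1)]:
--         r += 1
--     # pass 2: toggle the contiguous block
--     for idx in range(c - r, c + r + 1):
--         switch[idx] = change_switch(switch[idx])
--     return switch
-- ===== Notes on version B (the rewrite author's own statement) =====
-- stated objective: alternative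
-- what changed: A toggles while scanning in one interleaved while-loop with an iteration counter and break statements; B first computes the palindromic radius with a pure mutation-free scan, then toggles the whole contiguous block in a single range pass.
import Mathlib
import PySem

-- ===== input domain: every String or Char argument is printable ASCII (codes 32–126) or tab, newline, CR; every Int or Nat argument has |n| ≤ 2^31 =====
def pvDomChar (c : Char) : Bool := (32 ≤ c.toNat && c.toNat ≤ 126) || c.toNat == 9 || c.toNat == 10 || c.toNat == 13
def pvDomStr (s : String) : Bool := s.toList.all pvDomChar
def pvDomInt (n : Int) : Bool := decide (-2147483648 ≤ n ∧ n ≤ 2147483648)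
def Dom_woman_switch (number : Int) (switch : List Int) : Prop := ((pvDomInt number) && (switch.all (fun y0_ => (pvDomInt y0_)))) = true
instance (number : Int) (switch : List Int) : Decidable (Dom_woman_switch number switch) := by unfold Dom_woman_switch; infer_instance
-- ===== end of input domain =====

-- B re-implements A as two mutation-free passes (scan the palindromic radius, then toggle one
-- contiguous block) instead of A's interleaved toggle-while-scanning loop; same cost, both
-- mutate `switch` in place in Python and the equivalence proved here is about the return value.

-- ===== PORT A =====
def change_switch (x : Int) : Int :=
  if x = 0 then 1 else if x = 1 then 0 else x

-- switch[k] = change_switch(switch[k])  (pyGetD/pySetD; exact under Pre_, where k is in range)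
def pvToggleAt (sw : List Int) (k : Int) : List Int :=
  PySem.List.pySetD sw k (change_switch (PySem.List.pyGetD sw k 0))

-- A's while-loop for iterations i ≥ 1 (number is already decremented by the caller)
def womanLoop (number : Int) (i : Nat) (sw : List Int) : List Int :=
  if PySem.List.pyGetD sw (number - i) 0 = PySem.List.pyGetD sw (number + i) 0 then
    let sw' := pvToggleAt (pvToggleAt sw (number - i)) (number + i)
    if number - (i + 1 : Nat) < 0 ∨ number + (i + 1 : Nat) ≥ (sw'.length : Int) then sw'
    else womanLoop number (i + 1) sw'
  else sw
termination_by (number - i).toNat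
decreasing_by omega

def woman_switch (number : Int) (switch : List Int) : List Int :=
  let number := number - 1
  -- i = 0 iteration: toggle the center, then the bound check, then the loop from i = 1
  let sw0 := pvToggleAt switch number
  if number - 1 < 0 ∨ number + 1 ≥ (sw0.length : Int) then sw0
  else womanLoop number 1 sw0

-- ===== PORT B =====
-- pass 1: pure scan for the palindromic radius, no mutation
def altRadius (c : Int) (sw : List Int) (r : Nat) : Nat :=
  if 0 ≤ c - (r + 1 : Nat) ∧ c + (r + 1 : Nat) < (sw.length : Int) ∧
      PySem.List.pyGetD sw (c - (r + 1 : Nat)) 0 = PySem.List.pyGetD sw (c + (r + 1 : Nat)) 0 then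
    altRadius c sw (r + 1)
  else r
termination_by (c - r).toNat
decreasing_by omega

def woman_switch_alt (number : Int) (switch : List Int) : List Int :=
  let c := number - 1
  let r := altRadius c switch 0
  -- pass 2: toggle the contiguous block  for idx in range(c-r, c+r+1)
  (PySem.List.pyRange (c - r) (c + r + 1) 1).foldl (fun s idx => pvToggleAt s idx) switch

-- ===== PRECONDITION & SPEC =====
-- Pre_ excludes exactly the inputs where A raises IndexError: the center index number-1
-- outside Python's (negative-wrapping) range of `switch` — i.e. unless -len < number ≤ len.
def Pre_woman_switch (number : Int) (switch : List Int) : Prop :=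
  -(switch.length : Int) < number ∧ number ≤ (switch.length : Int)
instance (number : Int) (switch : List Int) : Decidable (Pre_woman_switch number switch) := by
  unfold Pre_woman_switch; infer_instance

def pvWitness_woman_switch : Int × List Int := (3, [1, 0, 1, 0, 1])

def Spec_woman_switch (number : Int) (switch : List Int) (out : List Int) : Prop := out = woman_switch_alt number switch
instance (number : Int) (switch : List Int) (out : List Int) : Decidable (Spec_woman_switch number switch out) := by unfold Spec_woman_switch; infer_instance

-- ===== CLAIM (what is proved, stated in full; the proofs are below) =====
def Claim_equal_woman_switch : Prop := ∀ (number : Int) (switch : List Int), Dom_woman_switch number switch → Pre_woman_switch number switch → Spec_woman_switch number switch (woman_switch number switch)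

-- ===== LEMMAS AND PROOFS =====

-- the pointwise description both programs are reduced to: toggle every index k with
-- lo ≤ |k - c| ≤ r
def band (c : Int) (lo r : Nat) (sw : List Int) : List Int :=
  sw.mapIdx (fun k v => if lo ≤ ((k : Int) - c).natAbs ∧ ((k : Int) - c).natAbs ≤ r then change_switch v else v)

-- interval form of the same band (what B's second pass produces)
def iband (a b : Int) (sw : List Int) : List Int :=
  sw.mapIdx (fun k v => if a ≤ (k : Int) ∧ (k : Int) ≤ b then change_switch v else v)

theorem length_toggle (sw : List Int) (t : Int) : (pvToggleAt sw t).length = sw.length := by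
  simp [pvToggleAt]

theorem band_length (c : Int) (lo r : Nat) (sw : List Int) : (band c lo r sw).length = sw.length := by
  simp [band]

theorem iband_length (a b : Int) (sw : List Int) : (iband a b sw).length = sw.length := by
  simp [iband]

theorem band_getElem (c : Int) (lo r : Nat) (sw : List Int) (k : Nat) (hk : k < sw.length) :
    (band c lo r sw)[k]'(by rw [band_length]; exact hk) =
      if lo ≤ ((k : Int) - c).natAbs ∧ ((k : Int) - c).natAbs ≤ r then change_switch sw[k] else sw[k] := by
  simp [band]

theorem iband_getElem (a b : Int) (sw : List Int) (k : Nat) (hk : k < sw.length) :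
    (iband a b sw)[k]'(by rw [iband_length]; exact hk) =
      if a ≤ (k : Int) ∧ (k : Int) ≤ b then change_switch sw[k] else sw[k] := by
  simp [iband]

theorem toggle_getElem (sw : List Int) (t : Int) (ht : 0 ≤ t) (hlt : t < (sw.length : Int))
    (k : Nat) (hk : k < sw.length) :
    (pvToggleAt sw t)[k]'(by rw [length_toggle]; exact hk) =
      if (k : Int) = t then change_switch sw[k] else sw[k] := by
  simp only [pvToggleAt, PySem.List.pySetD_of_nonneg _ _ ht,
    PySem.List.pyGetD_eq_getElem _ _ ht hlt, List.getElem_set]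
  split_ifs with h1 h2 h2
  · subst h1; simp
  · omega
  · omega
  · rfl

-- A's pair toggle at distance i is the one-row band
theorem toggle_pair_eq_band (c : Int) (i : Nat) (sw : List Int) (hi : 1 ≤ i)
    (h1 : 0 ≤ c - (i : Int)) (h2 : c + (i : Int) < (sw.length : Int)) :
    pvToggleAt (pvToggleAt sw (c - (i : Int))) (c + (i : Int)) = band c i i sw := by
  have hl1 : (pvToggleAt sw (c - (i : Int))).length = sw.length := length_toggle _ _
  apply List.ext_getElem (by rw [length_toggle, hl1, band_length])
  intro k hk1 hk2
  rw [band_length] at hk2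
  have hk' : k < (pvToggleAt sw (c - (i : Int))).length := by rw [hl1]; exact hk2
  rw [toggle_getElem _ _ (by omega) (by rw [hl1]; omega) k hk']
  rw [toggle_getElem _ _ (by omega) (by omega) k hk2]
  rw [band_getElem _ _ _ _ _ hk2]
  split_ifs <;> first | rfl | omega


-- the centre toggle is the zero-radius band
theorem toggle_center_eq_band (c : Int) (sw : List Int) (h1 : 0 ≤ c) (h2 : c < (sw.length : Int)) :
    pvToggleAt sw c = band c 0 0 sw := by
  apply List.ext_getElem (by rw [length_toggle, band_length])
  intro k hk1 hk2
  rw [band_length] at hk2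
  rw [toggle_getElem _ _ h1 h2 k hk2, band_getElem _ _ _ _ _ hk2]
  split_ifs <;> first | rfl | omega

theorem band_empty (c : Int) (lo r : Nat) (sw : List Int) (h : r < lo) : band c lo r sw = sw := by
  apply List.ext_getElem (by rw [band_length])
  intro k hk1 hk2
  rw [band_getElem _ _ _ _ _ hk2]
  split_ifs <;> first | rfl | omega

-- absorbing an inner one-row band
theorem band_band (c : Int) (i r : Nat) (sw : List Int) (hir : i ≤ r) :
    band c (i + 1) r (band c i i sw) = band c i r sw := by
  have hl : (band c i i sw).length = sw.length := band_length _ _ _ _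
  apply List.ext_getElem (by rw [band_length, band_length, band_length])
  intro k hk1 hk2
  rw [band_length] at hk2
  have hk' : k < (band c i i sw).length := by rw [hl]; exact hk2
  rw [band_getElem _ _ _ _ _ hk', band_getElem _ _ _ _ _ hk2, band_getElem _ _ _ _ _ hk2]
  split_ifs <;> first | rfl | omega

theorem pyGetD_band_outside (c : Int) (lo hi : Nat) (sw : List Int) (t : Int)
    (ht : 0 ≤ t) (htl : t < (sw.length : Int)) (hd : (hi : Int) < (t - c).natAbs) :
    PySem.List.pyGetD (band c lo hi sw) t 0 = PySem.List.pyGetD sw t 0 := by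
  have htl' : t < ((band c lo hi sw).length : Int) := by rw [band_length]; exact htl
  rw [PySem.List.pyGetD_eq_getElem _ _ ht htl', PySem.List.pyGetD_eq_getElem _ _ ht htl]
  have hk : t.toNat < sw.length := by omega
  rw [band_getElem _ _ _ _ _ hk]
  split_ifs with hcond
  · omega
  · rfl

theorem altRadius_stop (c : Int) (sw : List Int) (r : Nat)
    (h : ¬ (0 ≤ c - ((r + 1 : Nat) : Int) ∧ c + ((r + 1 : Nat) : Int) < (sw.length : Int) ∧
      PySem.List.pyGetD sw (c - ((r + 1 : Nat) : Int)) 0 = PySem.List.pyGetD sw (c + ((r + 1 : Nat) : Int)) 0)) :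
    altRadius c sw r = r := by
  rw [altRadius, if_neg h]

theorem altRadius_cont (c : Int) (sw : List Int) (r : Nat)
    (h : 0 ≤ c - ((r + 1 : Nat) : Int) ∧ c + ((r + 1 : Nat) : Int) < (sw.length : Int) ∧
      PySem.List.pyGetD sw (c - ((r + 1 : Nat) : Int)) 0 = PySem.List.pyGetD sw (c + ((r + 1 : Nat) : Int)) 0) :
    altRadius c sw r = altRadius c sw (r + 1) := by
  rw [altRadius, if_pos h]

theorem iband_empty (a b : Int) (sw : List Int) (h : b < a) : iband a b sw = sw := by
  apply List.ext_getElem (by rw [iband_length])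
  intro k hk1 hk2
  rw [iband_getElem _ _ _ _ hk2]
  split_ifs <;> first | rfl | omega

theorem iband_toggle (a b : Int) (sw : List Int) (ha : 0 ≤ a) (hab : a ≤ b)
    (hb : b < (sw.length : Int)) :
    iband (a + 1) b (pvToggleAt sw a) = iband a b sw := by
  have hl : (pvToggleAt sw a).length = sw.length := length_toggle _ _
  apply List.ext_getElem (by rw [iband_length, hl, iband_length])
  intro k hk1 hk2
  rw [iband_length] at hk2
  have hk' : k < (pvToggleAt sw a).length := by rw [hl]; exact hk2
  rw [iband_getElem _ _ _ _ hk', toggle_getElem _ _ ha (by omega) k hk2,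
    iband_getElem _ _ _ _ hk2]
  split_ifs <;> first | rfl | omega

-- the radius scan does not see toggles strictly inside distance r
theorem altRadius_band (c : Int) (lo hi r : Nat) (sw : List Int) (h : hi ≤ r) :
    altRadius c (band c lo hi sw) r = altRadius c sw r := by
  fun_induction altRadius c sw r with
  | case1 r hcond ih =>
    rw [← ih (by omega)]
    exact altRadius_cont _ _ _ (by
      obtain ⟨hA, hB, hC⟩ := hcond
      refine ⟨hA, by rw [band_length]; exact hB, ?_⟩
      rw [pyGetD_band_outside _ _ _ _ _ hA (by omega) (by omega),
        pyGetD_band_outside _ _ _ _ _ (by omega) hB (by omega)]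
      exact hC)
  | case2 r hcond =>
    exact altRadius_stop _ _ _ (by
      intro ⟨hA, hB, hC⟩
      exact hcond ⟨hA, by rw [band_length] at hB; exact hB, by
        rw [← pyGetD_band_outside c lo hi sw _ hA (by rw [band_length] at hB; omega) (by omega),
          ← pyGetD_band_outside c lo hi sw _ (by omega) (by rw [band_length] at hB; exact_mod_cast hB) (by omega)]
        exact hC⟩)

theorem le_altRadius (c : Int) (sw : List Int) (r : Nat) : r ≤ altRadius c sw r := by
  fun_induction altRadius c sw r with
  | case1 r hcond ih => omega
  | case2 r hcond => omega

theorem altRadius_bounds (c : Int) (sw : List Int) (r : Nat)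
    (h1 : 0 ≤ c - (r : Int)) (h2 : c + (r : Int) < (sw.length : Int)) :
    0 ≤ c - (altRadius c sw r : Int) ∧ c + (altRadius c sw r : Int) < (sw.length : Int) := by
  fun_induction altRadius c sw r with
  | case1 r hcond ih =>
    exact ih (by push_cast at hcond ⊢; omega) (by push_cast at hcond ⊢; omega)
  | case2 r hcond => exact ⟨h1, h2⟩

-- main loop invariant: A's loop from iteration i toggles exactly the band i … R
theorem womanLoop_eq (fuel : Nat) : ∀ (c : Int) (i : Nat) (sw : List Int),
    (c - (i : Int)).toNat ≤ fuel → 1 ≤ i → 0 ≤ c - (i : Int) → c + (i : Int) < (sw.length : Int) →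
    womanLoop c i sw = band c i (altRadius c sw (i - 1)) sw := by
  induction fuel using Nat.strong_induction_on with
  | _ fuel ih =>
  intro c i sw hf hi h1 h2
  have hie : i - 1 + 1 = i := by omega
  rw [womanLoop]
  simp only []
  split_ifs with hc hb
  · -- pair matches, then the bound check breaks
    have hR : altRadius c sw (i - 1) = i := by
      rw [altRadius_cont c sw (i - 1) (by rw [hie]; exact ⟨h1, h2, hc⟩), hie]
      apply altRadius_stop
      rw [length_toggle, length_toggle] at hb
      push_cast
      push_cast at hb
      omega
    rw [hR]
    exact toggle_pair_eq_band c i sw hi h1 h2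
  · -- pair matches, loop continues at i+1
    rw [length_toggle, length_toggle] at hb
    push_cast at hb
    have hb1 : 0 ≤ c - ((i + 1 : Nat) : Int) := by push_cast; omega
    have hb2 : c + ((i + 1 : Nat) : Int) < ((pvToggleAt (pvToggleAt sw (c - (i : Int))) (c + (i : Int))).length : Int) := by
      rw [length_toggle, length_toggle]; push_cast; omega
    rw [ih (c - ((i + 1 : Nat) : Int)).toNat (by push_cast; omega) c (i + 1) _ (le_refl _) (by omega) hb1 hb2]
    have hsw' : pvToggleAt (pvToggleAt sw (c - (i : Int))) (c + (i : Int)) = band c i i sw :=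
      toggle_pair_eq_band c i sw hi h1 h2
    rw [hsw']
    have hstep : altRadius c sw (i - 1) = altRadius c sw i :=
      altRadius_cont c sw (i - 1) (by rw [hie]; exact ⟨h1, h2, hc⟩) |>.trans (by rw [hie])
    have he2 : i + 1 - 1 = i := by omega
    rw [he2, altRadius_band c i i i sw (le_refl i), ← hstep]
    exact band_band c i _ sw (by rw [hstep]; exact le_altRadius c sw i)
  · -- pair mismatch: stop, nothing more toggled
    have hR : altRadius c sw (i - 1) = i - 1 := by
      apply altRadius_stop
      rw [hie]
      intro ⟨_, _, h3⟩
      exact hc h3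
    rw [hR, band_empty c i (i - 1) sw (by omega)]

-- B's second pass is the interval band
theorem fold_toggle_eq_iband (fuel : Nat) : ∀ (a b : Int) (sw : List Int),
    (b + 1 - a).toNat ≤ fuel → 0 ≤ a → b < (sw.length : Int) →
    (PySem.List.pyRange a (b + 1) 1).foldl (fun s idx => pvToggleAt s idx) sw = iband a b sw := by
  induction fuel using Nat.strong_induction_on with
  | _ fuel ih =>
  intro a b sw hf ha hb
  by_cases hab : b + 1 ≤ a
  · rw [PySem.List.pyRange_one_eq_nil hab, List.foldl_nil, iband_empty a b sw (by omega)]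
  · rw [PySem.List.pyRange_one_cons (by omega), List.foldl_cons]
    rw [ih (b + 1 - (a + 1)).toNat (by omega) (a + 1) b _ (le_refl _) (by omega)
      (by rw [length_toggle]; exact hb)]
    exact iband_toggle a b sw ha (by omega) hb

theorem iband_eq_band (c : Int) (R : Nat) (sw : List Int) :
    iband (c - (R : Int)) (c + (R : Int)) sw = band c 0 R sw := by
  apply List.ext_getElem (by rw [iband_length, band_length])
  intro k hk1 hk2
  rw [band_length] at hk2
  rw [iband_getElem _ _ _ _ hk2, band_getElem _ _ _ _ _ hk2]
  split_ifs <;> first | rfl | omega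

-- ===== VERDICT (by name: the statement is the Claim_ definition above) =====
theorem woman_switch_spec : Claim_equal_woman_switch := by
  intro number switch _ hpre
  have hp1 : -(switch.length : Int) < number := hpre.1
  have hp2 : number ≤ (switch.length : Int) := hpre.2
  show woman_switch number switch = woman_switch_alt number switch
  rw [woman_switch, woman_switch_alt]
  by_cases hcpos : 0 ≤ number - 1
  · have hclen : number - 1 < (switch.length : Int) := by omega
    by_cases hbrk : number - 1 - 1 < 0 ∨ number - 1 + 1 ≥ ((pvToggleAt switch (number - 1)).length : Int)
    · rw [if_pos hbrk]
      rw [length_toggle] at hbrk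
      have hR0 : altRadius (number - 1) switch 0 = 0 :=
        altRadius_stop _ _ _ (by push_cast; intro ⟨hA, hB, _⟩; omega)
      rw [hR0]
      simp only [Nat.cast_zero, sub_zero, add_zero]
      rw [fold_toggle_eq_iband ((number - 1) + 1 - (number - 1)).toNat (number - 1) (number - 1)
        switch (le_refl _) hcpos hclen]
      rw [toggle_center_eq_band _ _ hcpos hclen]
      have h00 := iband_eq_band (number - 1) 0 switch
      simp only [Nat.cast_zero, sub_zero, add_zero] at h00
      rw [h00]
    · rw [if_neg hbrk]
      rw [length_toggle] at hbrk
      push Not at hbrk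
      obtain ⟨hb1, hb2⟩ := hbrk
      rw [womanLoop_eq ((number - 1) - 1).toNat (number - 1) 1 _ (by push_cast; omega)
        (le_refl 1) (by push_cast; omega) (by rw [length_toggle]; push_cast; omega)]
      rw [toggle_center_eq_band _ _ hcpos hclen]
      rw [show (1 : Nat) - 1 = 0 from rfl]
      rw [altRadius_band (number - 1) 0 0 0 switch (le_refl 0)]
      rw [band_band (number - 1) 0 _ switch (Nat.zero_le _)]
      obtain ⟨hr1, hr2⟩ := altRadius_bounds (number - 1) switch 0 (by push_cast; omega)
        (by push_cast; omega)
      rw [fold_toggle_eq_iband ((number - 1) + (altRadius (number - 1) switch 0 : Int) + 1 -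
        ((number - 1) - (altRadius (number - 1) switch 0 : Int))).toNat _ _ switch (le_refl _) hr1 hr2]
      rw [iband_eq_band]
  · have hR0 : altRadius (number - 1) switch 0 = 0 :=
      altRadius_stop _ _ _ (by push_cast; intro ⟨hA, _, _⟩; omega)
    rw [hR0, if_pos (Or.inl (by omega))]
    simp only [Nat.cast_zero, sub_zero, add_zero]
    rw [PySem.List.pyRange_one_singleton, List.foldl_cons, List.foldl_nil]
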